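-- pv_equiv track=rewrite | github.com/Jejis06/ASD | oioioi/1_off/sol3.py | solution
-- ===== SOURCE A (Python) =====
-- def solution(words):
--     if not words:
--         return 0
--
--     uniq = sorted(set(words))
--     vals = dict(zip(uniq, range(1, len(uniq)+1)))
--
--     max_val = len(uniq)
--     tree = [0] * (max_val + 1)
--     max_cnt = 0
--
--     for word in words:
--         curr_val = vals[word]
--
--         ind = curr_val - 1
--         cnt = 0
--         while ind > 0:
--             cnt += tree[ind]
--             ind -= ind & (-ind)
--         if cnt > max_cnt:
--             max_cnt = cnt
--
--         ind = curr_val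
--         while ind <= max_val:
--             tree[ind] += 1
--             ind += ind & (-ind)
--     return max_cnt
-- ===== SOURCE B (Python) =====
-- def solution(words):
--     # Naive quadratic scan: for each word, count earlier strictly-smaller words,
--     # keep the running maximum.  No ranking dict, no Fenwick tree.
--     best = 0
--     seen = []
--     for w in words:
--         c = 0
--         for p in seen:
--             if p < w:
--                 c += 1
--         if c > best:
--             best = c
--         seen.append(w)
--     return best
-- ===== Notes on version B (the rewrite author's own statement) =====
-- stated objective: simpler
-- what changed: Replaced the rank-compression dict plus Fenwick (binary indexed) tree prefix-count machinery with a direct nested scan that compares the original words with '<' and keeps a running maximum of the count of earlier strictly-smaller words.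
import Mathlib
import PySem

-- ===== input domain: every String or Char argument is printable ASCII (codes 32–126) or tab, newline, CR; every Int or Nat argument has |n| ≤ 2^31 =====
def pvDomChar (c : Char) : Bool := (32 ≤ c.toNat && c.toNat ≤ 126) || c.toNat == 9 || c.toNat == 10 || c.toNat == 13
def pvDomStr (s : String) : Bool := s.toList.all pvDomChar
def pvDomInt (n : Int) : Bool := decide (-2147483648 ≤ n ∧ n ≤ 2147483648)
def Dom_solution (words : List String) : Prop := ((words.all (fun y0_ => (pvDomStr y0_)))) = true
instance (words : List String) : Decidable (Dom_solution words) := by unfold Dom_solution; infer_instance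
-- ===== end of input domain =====

-- B replaces A's rank dict + Fenwick tree by a direct nested scan comparing the
-- original words with '<' (simpler, not faster; same return value everywhere).

-- ===== PORT A =====
-- `ind & (-ind)` (Python's lowbit expression)
def pvLow (i : Int) : Int := PySem.Int.band i (-i)

-- termination facts for the two while-loops (cited in decreasing_by)
theorem pvLow_pos {i : Int} (h : 0 < i) : 0 < pvLow i := by
  unfold pvLow PySem.Int.band
  rw [if_pos (by omega : (0:Int) ≤ i), if_neg (by omega : ¬ (0:Int) ≤ -i),
    show (- -i - 1).toNat = i.toNat - 1 by omega]
  have h4 : i.toNat &&& (i.toNat - 1) ≤ i.toNat - 1 := Nat.and_le_right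
  omega

theorem pvLow_le {i : Int} (_h : 0 < i) : pvLow i ≤ i := by
  unfold pvLow PySem.Int.band
  rw [if_pos (by omega : (0:Int) ≤ i), if_neg (by omega : ¬ (0:Int) ≤ -i)]
  omega

-- `while ind > 0: cnt += tree[ind]; ind -= ind & (-ind)`
def qLoop (tree : List Int) (ind cnt : Int) : Int :=
  if h : 0 < ind then
    qLoop tree (ind - pvLow ind) (cnt + PySem.List.pyGetD tree ind 0)
  else cnt
termination_by ind.toNat
decreasing_by
  have h1 := pvLow_pos h
  have h2 := pvLow_le h
  omega

-- `while ind <= max_val: tree[ind] += 1; ind += ind & (-ind)`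
-- (the extra `0 < ind` conjunct is a totality guard only: in A this loop is always
-- entered with ind ≥ 1, where it is vacuously true)
def uLoop (maxVal : Int) (tree : List Int) (ind : Int) : List Int :=
  if h : 0 < ind ∧ ind ≤ maxVal then
    uLoop maxVal (PySem.List.pySetD tree ind (PySem.List.pyGetD tree ind 0 + 1)) (ind + pvLow ind)
  else tree
termination_by (maxVal + 1 - ind).toNat
decreasing_by
  have h1 := pvLow_pos h.1
  omega

-- `uniq = sorted(set(words))`
def pvUniq (words : List String) : List String :=
  PySem.List.sorted (PySem.Set.ofList words) (fun x => x) false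

-- `vals = dict(zip(uniq, range(1, len(uniq)+1)))`
def pvVals (words : List String) : PySem.Dict String Int :=
  PySem.Dict.ofList ((pvUniq words).zip (PySem.List.pyRange 1 (PySem.List.len (pvUniq words) + 1) 1))

def solution (words : List String) : Int :=
  if words = [] then 0
  else
    let uniq := pvUniq words
    let vals := pvVals words
    let maxVal : Int := PySem.List.len uniq
    let tree : List Int := PySem.List.pyRepeat [0] (maxVal + 1)
    -- vals[word]: every word is a key of vals, so KeyError is impossible and the
    -- total getD form is exact; likewise all tree indices reached are in range
    (words.foldl (fun st word =>
      let currVal := (pvVals words).getD word 0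
      let cnt := qLoop st.1 (currVal - 1) 0
      (uLoop maxVal st.1 currVal, if cnt > st.2 then cnt else st.2)) (tree, 0)).2

-- ===== PORT B =====
def solution_alt (words : List String) : Int :=
  (words.foldl (fun st w =>
    let c := st.1.foldl (fun acc p => if p < w then acc + 1 else acc) (0 : Int)
    (st.1 ++ [w], if c > st.2 then c else st.2)) (([] : List String), (0 : Int))).2

-- ===== PRECONDITION & SPEC =====
def Spec_solution (words : List String) (out : Int) : Prop := out = solution_alt words
instance (words : List String) (out : Int) : Decidable (Spec_solution words out) := by unfold Spec_solution; infer_instance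

-- ===== CLAIM (what is proved, stated in full; the proofs are below) =====
def Claim_equal_solution : Prop := ∀ (words : List String), Dom_solution words → Spec_solution words (solution words)

-- ===== LEMMAS AND PROOFS =====

-- the lowest set bit of a positive n, as the Nat value of `n & -n`
def lbN (n : Nat) : Nat := n - (n &&& (n - 1))

theorem pvLow_natCast {n : Nat} (h : 0 < n) : pvLow (n : Int) = (lbN n : Int) := by
  unfold pvLow PySem.Int.band lbN
  rw [if_pos (by omega : (0:Int) ≤ (n : Int)), if_neg (by omega : ¬ (0:Int) ≤ -(n : Int)),
    show (- -(n : Int) - 1).toNat = n - 1 by omega, Int.toNat_natCast]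

theorem lbN_pos {n : Nat} (h : 0 < n) : 0 < lbN n := by
  have h4 : n &&& (n - 1) ≤ n - 1 := Nat.and_le_right
  unfold lbN; omega

theorem lbN_le (n : Nat) : lbN n ≤ n := by unfold lbN; omega

theorem land_even_odd (a b : Nat) : (2*a) &&& (2*b+1) = 2*(a &&& b) := by
  apply Nat.eq_of_testBit_eq
  intro i
  cases i with
  | zero => simp [Nat.testBit_zero, Nat.mul_comm]
  | succ j =>
      rw [Nat.testBit_land, Nat.testBit_succ, Nat.testBit_succ, Nat.testBit_succ,
        show 2*a/2 = a by omega, show (2*b+1)/2 = b by omega, show 2*(a&&&b)/2 = a&&&b by omega,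
        Nat.testBit_land]

theorem land_odd_even (a b : Nat) : (2*a+1) &&& (2*b) = 2*(a &&& b) := by
  apply Nat.eq_of_testBit_eq
  intro i
  cases i with
  | zero => simp [Nat.testBit_zero, Nat.mul_comm]
  | succ j =>
      rw [Nat.testBit_land, Nat.testBit_succ, Nat.testBit_succ, Nat.testBit_succ,
        show (2*a+1)/2 = a by omega, show 2*b/2 = b by omega, show 2*(a&&&b)/2 = a&&&b by omega,
        Nat.testBit_land]

theorem lbN_odd (a : Nat) : lbN (2*a+1) = 1 := by
  unfold lbN
  rw [show 2*a+1-1 = 2*a from rfl, land_odd_even, Nat.and_self a]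
  omega

theorem lbN_even {a : Nat} (h : 0 < a) : lbN (2*a) = 2 * lbN a := by
  unfold lbN
  rw [show 2*a-1 = 2*(a-1)+1 by omega, land_even_odd]
  have h4 : a &&& (a - 1) ≤ a - 1 := Nat.and_le_right
  omega

theorem lbN_add_self {n : Nat} (h : 0 < n) : 2 * lbN n ≤ lbN (n + lbN n) := by
  induction n using Nat.strong_induction_on with
  | _ n IH =>
    rcases Nat.even_or_odd n with ⟨a, ha⟩ | ⟨a, ha⟩
    · have ha' : n = 2*a := by omega
      have hapos : 0 < a := by omega
      have h1 : lbN n = 2 * lbN a := by rw [ha']; exact lbN_even hapos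
      have h2 : n + lbN n = 2 * (a + lbN a) := by omega
      have h3 := IH a (by omega) hapos
      rw [h2, h1, lbN_even (by have := lbN_pos hapos; omega)]
      omega
    · have h1 : lbN n = 1 := by rw [ha]; exact lbN_odd a
      have h2 : n + lbN n = 2 * (a + 1) := by omega
      rw [h2, h1, lbN_even (by omega)]
      have := lbN_pos (show 0 < a + 1 by omega)
      omega

theorem lbN_add_lt {n r : Nat} (h0 : 0 < r) (h : r < lbN n) : lbN (n + r) = lbN r := by
  induction n using Nat.strong_induction_on generalizing r with
  | _ n IH =>
    rcases Nat.even_or_odd n with ⟨a, ha⟩ | ⟨a, ha⟩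
    · have ha' : n = 2*a := by omega
      have hapos : 0 < a := by
        by_contra hc
        have : n = 0 := by omega
        rw [this] at h; unfold lbN at h; omega
      have h1 : lbN n = 2 * lbN a := by rw [ha']; exact lbN_even hapos
      rcases Nat.even_or_odd r with ⟨s, hs⟩ | ⟨s, hs⟩
      · have hs' : r = 2*s := by omega
        have hspos : 0 < s := by omega
        have h2 : n + r = 2 * (a + s) := by omega
        rw [h2, lbN_even (by omega), hs', lbN_even hspos]
        rw [IH a (by omega) hspos (by omega)]
      · have h2 : n + r = 2*(a + s) + 1 := by omega
        rw [h2, lbN_odd, hs, lbN_odd]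
    · rw [ha, lbN_odd] at h; omega

-- counts per rank value over a processed prefix p
def rnk (words : List String) (w : String) : Nat :=
  1 + (pvUniq words).countP (fun u => decide (u < w))

def fCnt (words p : List String) (v : Nat) : Int :=
  (p.countP (fun x => decide (rnk words x = v)) : Int)

-- the Fenwick-tree invariant: entry i covers the rank interval (i - lowbit i, i]
def FInv (m : Nat) (tree : List Int) (f : Nat → Int) : Prop :=
  tree.length = m + 1 ∧
  ∀ i : Nat, 1 ≤ i → i ≤ m → tree.getD i 0 = ∑ j ∈ Finset.Ioc (i - lbN i) i, f j

theorem FInv_congr {m : Nat} {tree : List Int} {f g : Nat → Int}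
    (hInv : FInv m tree f) (h : ∀ j, f j = g j) : FInv m tree g := by
  refine ⟨hInv.1, fun i h1 h2 => ?_⟩
  rw [hInv.2 i h1 h2]
  exact Finset.sum_congr rfl (fun j _ => h j)

theorem qLoop_eq {m : Nat} {tree : List Int} {f : Nat → Int} (hInv : FInv m tree f) :
    ∀ k : Nat, k ≤ m → ∀ c : Int, qLoop tree (k : Int) c = c + ∑ j ∈ Finset.Ioc 0 k, f j := by
  intro k
  induction k using Nat.strong_induction_on with
  | _ k IH =>
    intro hk c
    rw [qLoop]
    by_cases hk0 : 0 < k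
    · rw [dif_pos (by exact_mod_cast hk0)]
      have hlb := pvLow_natCast hk0
      have hp := lbN_pos hk0
      have hle := lbN_le k
      have hcast : (k : Int) - pvLow (k : Int) = ((k - lbN k : Nat) : Int) := by
        rw [hlb]; omega
      rw [hcast, IH (k - lbN k) (by omega) (by omega)]
      rw [PySem.List.pyGetD_natCast, hInv.2 k (by omega) hk]
      have := Finset.sum_Ioc_consecutive f (show 0 ≤ k - lbN k by omega) (show k - lbN k ≤ k by omega)
      omega
    · rw [dif_neg (by omega)]
      have : k = 0 := by omega
      subst this
      simp

theorem uLoop_getD {m : Nat} {v : Nat} (hv : 1 ≤ v) :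
    ∀ (d i : Nat) (tree : List Int), m + 1 - i ≤ d → tree.length = m + 1 →
      i - lbN i < v → v ≤ i →
      ∀ j : Nat, 1 ≤ j → j ≤ m →
      (uLoop (m : Int) tree (i : Int)).getD j 0 =
        tree.getD j 0 + (if i ≤ j ∧ j - lbN j < v then 1 else 0) := by
  intro d
  induction d with
  | zero =>
      intro i tree hd hlen h1 h2 j hj1 hj2
      rw [uLoop, dif_neg (by omega), if_neg (by omega)]
      try omega
  | succ d IH =>
      intro i tree hd hlen h1 h2 j hj1 hj2
      by_cases him : i ≤ m
      · have hi0 : 0 < i := by omega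
        rw [uLoop, dif_pos (by constructor <;> [exact_mod_cast hi0; exact_mod_cast him])]
        have hlb := pvLow_natCast hi0
        have hlbp := lbN_pos hi0
        have hcast : (i : Int) + pvLow (i : Int) = ((i + lbN i : Nat) : Int) := by
          rw [hlb]; omega
        rw [hcast]
        set tree' := PySem.List.pySetD tree (i : Int) (PySem.List.pyGetD tree (i : Int) 0 + 1) with htree'
        have htree'' : tree' = tree.set i (tree.getD i 0 + 1) := by
          rw [htree', PySem.List.pySetD_natCast, PySem.List.pyGetD_natCast]
        have hlen' : tree'.length = m + 1 := by rw [htree'', List.length_set, hlen]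
        have hself := lbN_add_self hi0
        have h1' : (i + lbN i) - lbN (i + lbN i) < v := by omega
        have h2' : v ≤ i + lbN i := by omega
        rw [IH (i + lbN i) tree' (by omega) hlen' h1' h2' j hj1 hj2]
        have hget : tree'.getD j 0 = if j = i then tree.getD i 0 + 1 else tree.getD j 0 := by
          rw [htree'']
          rcases eq_or_ne j i with h | h
          · subst h
            rw [if_pos rfl, List.getD_eq_getElem?_getD, List.getElem?_set_self (by omega)]
            simp
          · rw [if_neg h, List.getD_eq_getElem?_getD, List.getElem?_set_ne (by omega),
                List.getD_eq_getElem?_getD]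
        rw [hget]
        -- case analysis on where j sits relative to the chain step i -> i + lbN i
        rcases eq_or_ne j i with hji | hji
        · subst hji
          split_ifs <;> omega
        · by_cases hmidc : i < j ∧ j < i + lbN i
          · have hmid : v ≤ j - lbN j := by
              have hr1 : 0 < j - i := by omega
              have hr2 : j - i < lbN i := by omega
              have hlbj : lbN j = lbN (j - i) := by
                conv_lhs => rw [show j = i + (j - i) by omega]
                exact lbN_add_lt hr1 hr2
              have := lbN_le (j - i)
              omega
            split_ifs <;> omega
          · split_ifs <;> omega
      · rw [uLoop, dif_neg (by omega), if_neg (by omega)]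
        try omega

theorem uLoop_inv {m : Nat} {tree : List Int} {f : Nat → Int} (hInv : FInv m tree f)
    {v : Nat} (h1 : 1 ≤ v) (h2 : v ≤ m) :
    FInv m (uLoop (m : Int) tree (v : Int)) (fun j => f j + if j = v then 1 else 0) := by
  have hlen : (uLoop (m : Int) tree (v : Int)).length = m + 1 := by
    have : ∀ (d : Nat) (i : Nat) (t : List Int), m + 1 - i ≤ d →
        (uLoop (m : Int) t (i : Int)).length = t.length := by
      intro d
      induction d with
      | zero =>
          intro i t hd
          rw [uLoop, dif_neg (by omega)]
      | succ d IH =>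
          intro i t hd
          by_cases hc : 0 < i ∧ i ≤ m
          · rw [uLoop, dif_pos (by constructor <;> [exact_mod_cast hc.1; exact_mod_cast hc.2])]
            have hlb := pvLow_natCast hc.1
            have hlbp := lbN_pos hc.1
            have hcast : (i : Int) + pvLow (i : Int) = ((i + lbN i : Nat) : Int) := by
              rw [hlb]; omega
            rw [hcast, IH (i + lbN i) _ (by omega)]
            rw [PySem.List.pySetD_natCast, List.length_set]
          · rw [uLoop, dif_neg (by intro hh; exact hc ⟨by exact_mod_cast hh.1, by exact_mod_cast hh.2⟩)]
    rw [this (m + 1) v tree (by omega), hInv.1]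
  refine ⟨hlen, fun i hi1 hi2 => ?_⟩
  have hvlb := lbN_pos h1
  rw [uLoop_getD h1 (m + 1) v tree (by omega) hInv.1 (by omega) (le_refl v) i hi1 hi2]
  rw [hInv.2 i hi1 hi2, Finset.sum_add_distrib]
  have : (∑ j ∈ Finset.Ioc (i - lbN i) i, if j = v then (1 : Int) else 0) =
      if v ∈ Finset.Ioc (i - lbN i) i then 1 else 0 := Finset.sum_ite_eq' _ v (fun _ => 1)
  rw [this]
  simp only [Finset.mem_Ioc]
  split_ifs <;> first | rfl | (exfalso; omega)

-- ranks: basic facts about sorted(set(words)) and the rank dict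
theorem pvUniq_pairwise (words : List String) : (pvUniq words).Pairwise (· < ·) :=
  PySem.List.sorted_ofList_pairwise_lt words

theorem pvUniq_nodup (words : List String) : (pvUniq words).Nodup :=
  (pvUniq_pairwise words).imp ne_of_lt

theorem mem_pvUniq {words : List String} {w : String} : w ∈ pvUniq words ↔ w ∈ words := by
  unfold pvUniq
  rw [PySem.List.mem_sorted, PySem.Set.mem_ofList]

theorem countP_pairwise_lt {l : List String} (hp : l.Pairwise (· < ·)) (k : Nat) (hk : k < l.length) :
    l.countP (fun u => decide (u < l[k])) = k := by
  obtain ⟨pre, suf, hps, hlen⟩ : ∃ pre suf, l = pre ++ suf ∧ pre.length = k :=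
    ⟨l.take k, l.drop k, (List.take_append_drop k l).symm, by simp; omega⟩
  subst hps
  have hpg := List.pairwise_iff_getElem.mp hp
  generalize hw : (pre ++ suf)[k] = w
  rw [List.countP_append]
  have h1 : pre.countP (fun u => decide (u < w)) = k := by
    rw [List.countP_eq_length.mpr, hlen]
    intro x hx
    obtain ⟨i, hi, hie⟩ := List.mem_iff_getElem.mp hx
    have he : pre[i]'hi = (pre ++ suf)[i]'(by simp [List.length_append]; omega) :=
      (List.getElem_append_left (by omega)).symm
    simp only [decide_eq_true_eq]
    rw [← hie, he, ← hw]
    exact hpg i k (by simp [List.length_append]; omega) hk (by omega)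
  have h2 : suf.countP (fun u => decide (u < w)) = 0 := by
    rw [List.countP_eq_zero]
    intro x hx
    obtain ⟨j, hj, hje⟩ := List.mem_iff_getElem.mp hx
    have he : suf[j]'hj = (pre ++ suf)[k + j]'(by simp [List.length_append]; omega) := by
      rw [List.getElem_append_right (by omega)]
      congr 1
      omega
    simp only [decide_eq_true_eq]
    rw [← hje, he]
    rcases Nat.eq_zero_or_pos j with hj0 | hj0
    · subst hj0
      simp only [Nat.add_zero, hw]
      exact lt_irrefl w
    · have hgt := hpg k (k + j) hk (by simp [List.length_append]; omega) (by omega)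
      rw [hw] at hgt
      exact fun hlt => absurd (lt_trans hgt hlt) (lt_irrefl _)
  omega

theorem countP_lt_getElem (words : List String) (k : Nat) (hk : k < (pvUniq words).length) :
    (pvUniq words).countP (fun u => decide (u < (pvUniq words)[k])) = k :=
  countP_pairwise_lt (pvUniq_pairwise words) k hk

theorem rnk_getElem (words : List String) (k : Nat) (hk : k < (pvUniq words).length) :
    rnk words ((pvUniq words)[k]) = k + 1 := by
  unfold rnk
  rw [countP_lt_getElem words k hk]
  omega

theorem rnk_lt_iff {words : List String} {u w : String} (hu : u ∈ words) (hw : w ∈ words) :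
    rnk words u < rnk words w ↔ u < w := by
  obtain ⟨ku, hku, hkue⟩ := List.mem_iff_getElem.mp (mem_pvUniq.mpr hu)
  obtain ⟨kw, hkw, hkwe⟩ := List.mem_iff_getElem.mp (mem_pvUniq.mpr hw)
  have hpg := List.pairwise_iff_getElem.mp (pvUniq_pairwise words)
  rw [← hkue, ← hkwe, rnk_getElem words ku hku, rnk_getElem words kw hkw]
  constructor
  · intro h
    exact hpg ku kw hku hkw (by omega)
  · intro h
    by_contra hc
    rcases Nat.lt_or_ge kw ku with hlt | hge
    · exact absurd (lt_trans (hpg kw ku hkw hku hlt) h) (lt_irrefl _)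
    · have : kw = ku := by omega
      subst this
      exact absurd h (lt_irrefl _)

theorem rnk_pos (words : List String) (w : String) : 1 ≤ rnk words w := by
  unfold rnk; omega

theorem rnk_le {words : List String} {w : String} (hw : w ∈ words) :
    rnk words w ≤ (pvUniq words).length := by
  have h1 : ((pvUniq words).countP (fun u => decide (u < w))) ≤ (pvUniq words).length :=
    List.countP_le_length
  have h2 : ((pvUniq words).countP (fun u => decide (u < w))) ≠ (pvUniq words).length := by
    intro he
    have := List.countP_eq_length.mp he w (mem_pvUniq.mpr hw)
    simp only [decide_eq_true_eq] at this
    exact absurd this (lt_irrefl w)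
  unfold rnk
  omega

theorem pvVals_items (words : List String) :
    (pvVals words).items =
      (pvUniq words).zip (PySem.List.pyRange 1 (PySem.List.len (pvUniq words) + 1) 1) := by
  have hlenr : (PySem.List.pyRange 1 (PySem.List.len (pvUniq words) + 1) 1).length
      = (pvUniq words).length := by
    rw [PySem.List.length_pyRange_one, PySem.List.len_eq]
    omega
  have hfst : ((pvUniq words).zip
      (PySem.List.pyRange 1 (PySem.List.len (pvUniq words) + 1) 1)).map Prod.fst = pvUniq words :=
    List.map_fst_zip (by omega)
  unfold pvVals PySem.Dict.ofList PySem.Dict.update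
  rw [PySem.Dict.items_foldl_insert_fresh
    ((pvUniq words).zip (PySem.List.pyRange 1 (PySem.List.len (pvUniq words) + 1) 1))
    Prod.fst Prod.snd PySem.Dict.empty
    (fun a _ => PySem.Dict.contains_empty (Prod.fst a)) (by rw [hfst]; exact pvUniq_nodup words)]
  simp
  rfl

theorem pvVals_keys_nodup (words : List String) : (pvVals words).keys.Nodup := by
  have : (pvVals words).keys = pvUniq words := by
    show (pvVals words).items.map Prod.fst = _
    rw [pvVals_items]
    exact List.map_fst_zip (by rw [PySem.List.length_pyRange_one, PySem.List.len_eq]; omega)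
  rw [this]
  exact pvUniq_nodup words

theorem getD_pvVals {words : List String} {w : String} (hw : w ∈ words) :
    (pvVals words).getD w 0 = (rnk words w : Int) := by
  obtain ⟨k, hk, hke⟩ := List.mem_iff_getElem.mp (mem_pvUniq.mpr hw)
  have hlenr : (PySem.List.pyRange 1 (PySem.List.len (pvUniq words) + 1) 1).length
      = (pvUniq words).length := by
    rw [PySem.List.length_pyRange_one, PySem.List.len_eq]
    omega
  have hmem : (w, ((1 : Int) + (k : Int))) ∈ (pvVals words).items := by
    rw [pvVals_items]
    have hzl : k < ((pvUniq words).zip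
        (PySem.List.pyRange 1 (PySem.List.len (pvUniq words) + 1) 1)).length := by
      rw [List.length_zip, hlenr]
      omega
    have := List.getElem_zip (l := pvUniq words)
      (l' := PySem.List.pyRange 1 (PySem.List.len (pvUniq words) + 1) 1) (i := k) (h := hzl)
    rw [PySem.List.getElem_pyRange_one, hke] at this
    rw [← this]
    exact List.getElem_mem hzl
  rw [PySem.Dict.getD_of_mem_items _ hmem (pvVals_keys_nodup words)]
  rw [← hke, rnk_getElem words k hk]
  omega

theorem sum_fCnt (words p : List String) (K : Nat) :
    ∑ j ∈ Finset.Ioc 0 K, fCnt words p j =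
      (p.countP (fun x => decide (rnk words x ≤ K)) : Int) := by
  induction p with
  | nil => simp [fCnt]
  | cons x p IH =>
      have hstep : ∀ j, fCnt words (x :: p) j = fCnt words p j + if rnk words x = j then 1 else 0 := by
        intro j
        unfold fCnt
        rw [List.countP_cons]
        rcases eq_or_ne (rnk words x) j with h | h
        · simp [h]
        · simp [h]
      calc ∑ j ∈ Finset.Ioc 0 K, fCnt words (x :: p) j
          = ∑ j ∈ Finset.Ioc 0 K, (fCnt words p j + if rnk words x = j then 1 else 0) := by
            exact Finset.sum_congr rfl (fun j _ => hstep j)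
        _ = (∑ j ∈ Finset.Ioc 0 K, fCnt words p j) +
              ∑ j ∈ Finset.Ioc 0 K, (if rnk words x = j then (1 : Int) else 0) := Finset.sum_add_distrib
        _ = (p.countP (fun x => decide (rnk words x ≤ K)) : Int) +
              (if rnk words x ≤ K then 1 else 0) := by
            rw [IH, Finset.sum_ite_eq _ (rnk words x) (fun _ => (1 : Int))]
            simp only [Finset.mem_Ioc]
            have := rnk_pos words x
            split_ifs <;> first | rfl | (exfalso; omega)
        _ = ((x :: p).countP (fun x => decide (rnk words x ≤ K)) : Int) := by
            rw [List.countP_cons]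
            rcases le_or_gt (rnk words x) K with h | h
            · simp [h]
            · simp [Nat.not_le.mpr h]

theorem fold_eq (words : List String) :
    ∀ (rest p : List String) (tree : List Int) (mc : Int),
      (∀ x ∈ rest, x ∈ words) → (∀ x ∈ p, x ∈ words) →
      FInv (pvUniq words).length tree (fCnt words p) →
      (rest.foldl (fun st word =>
        ((uLoop (PySem.List.len (pvUniq words)) st.1 ((pvVals words).getD word 0),
          if qLoop st.1 ((pvVals words).getD word 0 - 1) 0 > st.2
          then qLoop st.1 ((pvVals words).getD word 0 - 1) 0 else st.2) : List Int × Int)) (tree, mc)).2 =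
      (rest.foldl (fun st w =>
        ((st.1 ++ [w],
          if st.1.foldl (fun acc p => if p < w then acc + 1 else acc) (0 : Int) > st.2
          then st.1.foldl (fun acc p => if p < w then acc + 1 else acc) (0 : Int)
          else st.2) : List String × Int)) (p, mc)).2 := by
  intro rest
  induction rest with
  | nil => intro p tree mc _ _ _; rfl
  | cons w rest IH =>
    intro p tree mc hrest hp hInv
    simp only [List.foldl_cons]
    have hw : w ∈ words := hrest w (List.mem_cons_self)
    have hv := getD_pvVals hw
    have hr1 := rnk_pos words w
    have hrm := rnk_le hw
    have hcnt : qLoop tree ((pvVals words).getD w 0 - 1) 0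
        = (p.countP (fun x => decide (x < w)) : Int) := by
      rw [hv, show ((rnk words w : Nat) : Int) - 1 = ((rnk words w - 1 : Nat) : Int) by omega,
        qLoop_eq hInv (rnk words w - 1) (by omega) 0, sum_fCnt, zero_add]
      congr 1
      apply List.countP_congr
      intro x hx
      simp only [decide_eq_true_eq]
      constructor
      · intro hh
        exact (rnk_lt_iff (hp x hx) hw).mp (by omega)
      · intro hh
        have := (rnk_lt_iff (hp x hx) hw).mpr hh
        omega
    have hb : p.foldl (fun acc q => if q < w then acc + 1 else acc) (0 : Int)
        = (p.countP (fun x => decide (x < w)) : Int) := by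
      rw [PySem.List.foldl_ite_add_one (fun q => q < w) p 0, zero_add]
    have hInvN : FInv (pvUniq words).length
        (uLoop (PySem.List.len (pvUniq words)) tree ((pvVals words).getD w 0))
        (fCnt words (p ++ [w])) := by
      rw [hv, PySem.List.len_eq]
      refine FInv_congr (uLoop_inv hInv hr1 hrm) (fun j => ?_)
      unfold fCnt
      rw [List.countP_append]
      push_cast
      congr 1
      rcases eq_or_ne (rnk words w) j with he | he
      · simp [he]
      · simp [he, Ne.symm he]
    rw [hcnt, hb]
    exact IH (p ++ [w]) _ _
      (fun x hx => hrest x (List.mem_cons_of_mem w hx))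
      (by
        intro x hx
        rcases List.mem_append.mp hx with hx1 | hx1
        · exact hp x hx1
        · rw [List.mem_singleton.mp hx1]; exact hw)
      hInvN

-- ===== VERDICT (by name: the statement is the Claim_ definition above) =====
theorem solution_spec : Claim_equal_solution := by
  intro words _
  unfold Spec_solution solution
  rcases eq_or_ne words [] with h | h
  · subst h; rfl
  · rw [if_neg h]
    have hInv0 : FInv (pvUniq words).length
        (PySem.List.pyRepeat [0] (PySem.List.len (pvUniq words) + 1)) (fCnt words []) := by
      constructor
      · rw [PySem.List.pyRepeat_singleton, List.length_replicate, PySem.List.len_eq]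
        omega
      · intro i h1 h2
        rw [PySem.List.pyRepeat_singleton]
        have hi : i < ((PySem.List.len (pvUniq words) + 1).toNat) := by
          rw [PySem.List.len_eq]; omega
        rw [List.getD_eq_getElem?_getD, List.getElem?_replicate, if_pos hi]
        unfold fCnt
        simp
    exact fold_eq words words [] _ 0 (fun x hx => hx)
      (fun x hx => absurd hx (by simp)) hInv0
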